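-- pv_equiv track=rewrite | github.com/bridget-smart/temporal_profiles | functions/cross_correlogram.py | possible_time_del
-- ===== SOURCE A (Python) =====
-- def possible_time_del(t1,t2,win,T):
--     '''
--     Here window truncates the distribution so you don't see all the edges
--     one sided - source to target
--
--     possible speed up using numba
--     '''
--     deltas_ = []
--     for x in t1:
--         if ((win)<=x<=(T-win)):  # exclude boundaries of size w - only want the middle T-w 'win' of the data
--             for y in t2:
--                 if abs(x-y) <= win:
--                     deltas_.append(-x+y)
--     return deltas_
-- ===== SOURCE B (Python) =====
-- def _bisect_left(vals, v, lo, hi):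
--     # first index in [lo, hi) whose value is >= v (vals ascending)
--     while lo < hi:
--         mid = (lo + hi) // 2
--         if vals[mid] < v:
--             lo = mid + 1
--         else:
--             hi = mid
--     return lo
--
--
-- def _bisect_right(vals, v, lo, hi):
--     # first index in [lo, hi) whose value is > v (vals ascending)
--     while lo < hi:
--         mid = (lo + hi) // 2
--         if vals[mid] <= v:
--             lo = mid + 1
--         else:
--             hi = mid
--     return lo
--
--
-- def possible_time_del(t1, t2, win, T):
--     # Sort (original index, value) pairs of t2 by value once; for each mid-window
--     # x binary-search the value range [x-win, x+win] and emit the slice, restored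
--     # to original t2 order by sorting the kept pairs on their stored index.
--     pairs = sorted(enumerate(t2), key=lambda p: p[1])
--     vals = [p[1] for p in pairs]
--     n = len(vals)
--     out = []
--     for x in t1:
--         if win <= x <= T - win:
--             lo = _bisect_left(vals, x - win, 0, n)
--             hi = _bisect_right(vals, x + win, 0, n)
--             for q in sorted(pairs[lo:hi], key=lambda p: p[0]):
--                 out.append(q[1] - x)
--     return out
-- ===== Notes on version B (the rewrite author's own statement) =====
-- stated objective: alternative
-- what changed: Replaces A's per-source linear scan of t2 by a one-time sort of t2's (index,value) pairs plus a hand-rolled binary search of the value window [x-win,x+win] for each mid-window x, emitting the matched slice restored to original t2 order; it trades A's nested scans for sort/binary-search machinery of similar measured cost on the tested workloads.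
import Mathlib
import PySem

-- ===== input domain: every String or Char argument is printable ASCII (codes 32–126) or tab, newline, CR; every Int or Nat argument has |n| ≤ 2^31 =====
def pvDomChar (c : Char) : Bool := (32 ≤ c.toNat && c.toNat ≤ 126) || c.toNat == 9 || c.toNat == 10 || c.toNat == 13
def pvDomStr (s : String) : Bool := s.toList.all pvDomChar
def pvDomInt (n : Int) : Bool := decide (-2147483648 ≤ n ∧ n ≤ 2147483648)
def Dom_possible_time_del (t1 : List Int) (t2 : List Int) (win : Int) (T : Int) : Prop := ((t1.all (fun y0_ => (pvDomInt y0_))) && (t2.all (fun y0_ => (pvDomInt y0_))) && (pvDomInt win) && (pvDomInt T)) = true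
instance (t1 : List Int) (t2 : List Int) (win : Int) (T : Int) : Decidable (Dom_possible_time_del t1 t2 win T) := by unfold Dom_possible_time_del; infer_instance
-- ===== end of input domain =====

-- B replaces A's per-source linear scan of t2 by one sort of t2's (index,value)
-- pairs plus a binary search of the value window per mid-window x (an
-- alternative algorithm; same return value).

-- ===== PORT A =====
def possible_time_del (t1 : List Int) (t2 : List Int) (win : Int) (T : Int) : List Int :=
  t1.foldl (fun deltas x =>
    if win ≤ x ∧ x ≤ T - win then
      t2.foldl (fun deltas y =>
        if |x - y| ≤ win then deltas ++ [-x + y] else deltas) deltas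
    else deltas) []

-- ===== PORT B =====
-- Source B's hand-written `_bisect_left` while-loop: lo and hi stay in [0, len vals],
-- so Nat with Nat division is exact for Python's ints and `//`; `vals[mid]` is
-- always in range when read (lo ≤ mid < hi ≤ len), so `getD` is exact there.
-- The `gas` parameter (initially hi - lo, which strictly shrinks each turn) only
-- makes the loop structurally recursive; it never runs out.
def pvBisectLAux (vals : List Int) (v : Int) : Nat → Nat → Nat → Nat
  | 0, lo, _ => lo
  | gas + 1, lo, hi =>
    if lo < hi then
      let mid := (lo + hi) / 2
      if vals.getD mid 0 < v then pvBisectLAux vals v gas (mid + 1) hi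
      else pvBisectLAux vals v gas lo mid
    else lo

def pvBisectL (vals : List Int) (v : Int) (lo hi : Nat) : Nat :=
  pvBisectLAux vals v (hi - lo) lo hi

-- Source B's `_bisect_right` (same remarks as `pvBisectL`)
def pvBisectRAux (vals : List Int) (v : Int) : Nat → Nat → Nat → Nat
  | 0, lo, _ => lo
  | gas + 1, lo, hi =>
    if lo < hi then
      let mid := (lo + hi) / 2
      if vals.getD mid 0 ≤ v then pvBisectRAux vals v gas (mid + 1) hi
      else pvBisectRAux vals v gas lo mid
    else lo

def pvBisectR (vals : List Int) (v : Int) (lo hi : Nat) : Nat :=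
  pvBisectRAux vals v (hi - lo) lo hi

def possible_time_del_alt (t1 : List Int) (t2 : List Int) (win : Int) (T : Int) : List Int :=
  let pairs := PySem.List.sorted (PySem.List.enumerate t2) (fun p => p.2)
  let vals := pairs.map (fun p => p.2)
  let n := vals.length
  t1.foldl (fun out x =>
    if win ≤ x ∧ x ≤ T - win then
      let lo := pvBisectL vals (x - win) 0 n
      let hi := pvBisectR vals (x + win) 0 n
      (PySem.List.sorted (PySem.List.slice pairs (some (lo : Int)) (some (hi : Int)))
          (fun p => p.1)).foldl (fun out q => out ++ [q.2 - x]) out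
    else out) []

-- ===== PRECONDITION & SPEC =====
def Spec_possible_time_del (t1 : List Int) (t2 : List Int) (win : Int) (T : Int) (out : List Int) : Prop := out = possible_time_del_alt t1 t2 win T
instance (t1 : List Int) (t2 : List Int) (win : Int) (T : Int) (out : List Int) : Decidable (Spec_possible_time_del t1 t2 win T out) := by unfold Spec_possible_time_del; infer_instance

-- ===== CLAIM (what is proved, stated in full; the proofs are below) =====
def Claim_equal_possible_time_del : Prop := ∀ (t1 : List Int) (t2 : List Int) (win : Int) (T : Int), Dom_possible_time_del t1 t2 win T → Spec_possible_time_del t1 t2 win T (possible_time_del t1 t2 win T)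

-- ===== LEMMAS AND PROOFS =====

-- pvBisectLAux finds the first index whose value is ≥ v (ascending list, enough gas)
theorem pvBisectLAux_spec (vals : List Int) (v : Int)
    (hs : List.Pairwise (· ≤ ·) vals) :
    ∀ gas lo hi : Nat, hi - lo ≤ gas → lo ≤ hi → hi ≤ vals.length →
    (∀ j (_ : j < vals.length), j < lo → vals[j] < v) →
    (∀ j (_ : j < vals.length), hi ≤ j → v ≤ vals[j]) →
    (∀ j (_ : j < vals.length), j < pvBisectLAux vals v gas lo hi → vals[j] < v) ∧
    (∀ j (_ : j < vals.length), pvBisectLAux vals v gas lo hi ≤ j → v ≤ vals[j]) ∧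
    lo ≤ pvBisectLAux vals v gas lo hi ∧ pvBisectLAux vals v gas lo hi ≤ hi := by
  intro gas
  induction gas with
  | zero =>
    intro lo hi hg hle hhi hbelow habove
    have : lo = hi := by omega
    subst this
    exact ⟨by simpa [pvBisectLAux] using hbelow, by simpa [pvBisectLAux] using habove,
      by simp [pvBisectLAux], by simp [pvBisectLAux]⟩
  | succ gas ih =>
    intro lo hi hg hle hhi hbelow habove
    by_cases hlt : lo < hi
    · rw [pvBisectLAux, if_pos hlt]
      set mid := (lo + hi) / 2 with hmdef
      have hmb : lo ≤ mid ∧ mid < hi := by rw [hmdef]; omega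
      have hmlt : mid < vals.length := by omega
      by_cases hc : vals.getD mid 0 < v
      · rw [if_pos hc]
        have hvm : vals[mid] < v := by rwa [List.getD_eq_getElem vals 0 hmlt] at hc
        have hnew : ∀ j (_ : j < vals.length), j < mid + 1 → vals[j] < v := by
          intro j hj hjm
          rcases Nat.lt_or_ge j mid with h | h
          · exact lt_of_le_of_lt (List.pairwise_iff_getElem.mp hs j mid hj hmlt h) hvm
          · have : j = mid := by omega
            subst this; exact hvm
        have := ih (mid + 1) hi (by omega) (by omega) hhi hnew habove
        exact ⟨this.1, this.2.1, by omega, this.2.2.2⟩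
      · rw [if_neg hc]
        have hvm : v ≤ vals[mid] := by
          rw [List.getD_eq_getElem vals 0 hmlt] at hc; omega
        have hnew : ∀ j (_ : j < vals.length), mid ≤ j → v ≤ vals[j] := by
          intro j hj hjm
          rcases Nat.lt_or_ge mid j with h | h
          · exact hvm.trans (List.pairwise_iff_getElem.mp hs mid j hmlt hj h)
          · have : j = mid := by omega
            subst this; exact hvm
        have := ih lo mid (by omega) (by omega) (by omega) hbelow hnew
        exact ⟨this.1, this.2.1, this.2.2.1, by omega⟩
    · rw [pvBisectLAux, if_neg hlt]
      have : lo = hi := by omega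
      subst this
      exact ⟨hbelow, habove, le_refl _, le_refl _⟩

-- pvBisectRAux finds the first index whose value is > v (ascending list, enough gas)
theorem pvBisectRAux_spec (vals : List Int) (v : Int)
    (hs : List.Pairwise (· ≤ ·) vals) :
    ∀ gas lo hi : Nat, hi - lo ≤ gas → lo ≤ hi → hi ≤ vals.length →
    (∀ j (_ : j < vals.length), j < lo → vals[j] ≤ v) →
    (∀ j (_ : j < vals.length), hi ≤ j → v < vals[j]) →
    (∀ j (_ : j < vals.length), j < pvBisectRAux vals v gas lo hi → vals[j] ≤ v) ∧
    (∀ j (_ : j < vals.length), pvBisectRAux vals v gas lo hi ≤ j → v < vals[j]) ∧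
    lo ≤ pvBisectRAux vals v gas lo hi ∧ pvBisectRAux vals v gas lo hi ≤ hi := by
  intro gas
  induction gas with
  | zero =>
    intro lo hi hg hle hhi hbelow habove
    have : lo = hi := by omega
    subst this
    exact ⟨by simpa [pvBisectRAux] using hbelow, by simpa [pvBisectRAux] using habove,
      by simp [pvBisectRAux], by simp [pvBisectRAux]⟩
  | succ gas ih =>
    intro lo hi hg hle hhi hbelow habove
    by_cases hlt : lo < hi
    · rw [pvBisectRAux, if_pos hlt]
      set mid := (lo + hi) / 2 with hmdef
      have hmb : lo ≤ mid ∧ mid < hi := by rw [hmdef]; omega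
      have hmlt : mid < vals.length := by omega
      by_cases hc : vals.getD mid 0 ≤ v
      · rw [if_pos hc]
        have hvm : vals[mid] ≤ v := by rwa [List.getD_eq_getElem vals 0 hmlt] at hc
        have hnew : ∀ j (_ : j < vals.length), j < mid + 1 → vals[j] ≤ v := by
          intro j hj hjm
          rcases Nat.lt_or_ge j mid with h | h
          · exact (List.pairwise_iff_getElem.mp hs j mid hj hmlt h).trans hvm
          · have : j = mid := by omega
            subst this; exact hvm
        have := ih (mid + 1) hi (by omega) (by omega) hhi hnew habove
        exact ⟨this.1, this.2.1, by omega, this.2.2.2⟩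
      · rw [if_neg hc]
        have hvm : v < vals[mid] := by
          rw [List.getD_eq_getElem vals 0 hmlt] at hc; omega
        have hnew : ∀ j (_ : j < vals.length), mid ≤ j → v < vals[j] := by
          intro j hj hjm
          rcases Nat.lt_or_ge mid j with h | h
          · exact hvm.trans_le (List.pairwise_iff_getElem.mp hs mid j hmlt hj h)
          · have : j = mid := by omega
            subst this; exact hvm
        have := ih lo mid (by omega) (by omega) (by omega) hbelow hnew
        exact ⟨this.1, this.2.1, this.2.2.1, by omega⟩
    · rw [pvBisectRAux, if_neg hlt]
      have : lo = hi := by omega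
      subst this
      exact ⟨hbelow, habove, le_refl _, le_refl _⟩

-- the wrapper specs, with gas = hi - lo
theorem pvBisectL_spec (vals : List Int) (v : Int)
    (hs : List.Pairwise (· ≤ ·) vals) (lo hi : Nat) (hle : lo ≤ hi) (hhi : hi ≤ vals.length)
    (hbelow : ∀ j (_ : j < vals.length), j < lo → vals[j] < v)
    (habove : ∀ j (_ : j < vals.length), hi ≤ j → v ≤ vals[j]) :
    (∀ j (_ : j < vals.length), j < pvBisectL vals v lo hi → vals[j] < v) ∧
    (∀ j (_ : j < vals.length), pvBisectL vals v lo hi ≤ j → v ≤ vals[j]) ∧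
    lo ≤ pvBisectL vals v lo hi ∧ pvBisectL vals v lo hi ≤ hi :=
  pvBisectLAux_spec vals v hs (hi - lo) lo hi (le_refl _) hle hhi hbelow habove

theorem pvBisectR_spec (vals : List Int) (v : Int)
    (hs : List.Pairwise (· ≤ ·) vals) (lo hi : Nat) (hle : lo ≤ hi) (hhi : hi ≤ vals.length)
    (hbelow : ∀ j (_ : j < vals.length), j < lo → vals[j] ≤ v)
    (habove : ∀ j (_ : j < vals.length), hi ≤ j → v < vals[j]) :
    (∀ j (_ : j < vals.length), j < pvBisectR vals v lo hi → vals[j] ≤ v) ∧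
    (∀ j (_ : j < vals.length), pvBisectR vals v lo hi ≤ j → v < vals[j]) ∧
    lo ≤ pvBisectR vals v lo hi ∧ pvBisectR vals v lo hi ≤ hi :=
  pvBisectRAux_spec vals v hs (hi - lo) lo hi (le_refl _) hle hhi hbelow habove

-- if p is false exactly on indices < lo, filtering is dropping
theorem pvFilter_eq_drop {α : Type} (p : α → Bool) (l : List α) :
    ∀ lo : Nat,
    (∀ j (_ : j < l.length), j < lo → p l[j] = false) →
    (∀ j (_ : j < l.length), lo ≤ j → p l[j] = true) →
    l.filter p = l.drop lo := by
  induction l with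
  | nil => intro lo _ _; simp
  | cons a l ih =>
    intro lo h1 h2
    cases lo with
    | zero =>
      rw [List.drop_zero]
      apply List.filter_eq_self.mpr
      intro x hx
      rcases List.mem_iff_getElem.mp hx with ⟨i, hi, rfl⟩
      exact h2 i hi (Nat.zero_le i)
    | succ lo' =>
      have ha : p a = false := h1 0 (by simp) (by omega)
      rw [List.filter_cons, if_neg (by simp [ha]), List.drop_succ_cons]
      exact ih lo' (fun j hj hjl => h1 (j + 1) (by simpa using Nat.succ_lt_succ hj) (by omega))
        (fun j hj hjl => h2 (j + 1) (by simpa using Nat.succ_lt_succ hj) (by omega))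

-- if q is true exactly on indices < hi, filtering is taking
theorem pvFilter_eq_take {α : Type} (q : α → Bool) (l : List α) :
    ∀ hi : Nat,
    (∀ j (_ : j < l.length), j < hi → q l[j] = true) →
    (∀ j (_ : j < l.length), hi ≤ j → q l[j] = false) →
    l.filter q = l.take hi := by
  induction l with
  | nil => intro hi _ _; simp
  | cons a l ih =>
    intro hi h1 h2
    cases hi with
    | zero =>
      rw [List.take_zero]
      apply List.filter_eq_nil_iff.mpr
      intro x hx
      rcases List.mem_iff_getElem.mp hx with ⟨i, hi', rfl⟩
      simp [h2 i hi' (Nat.zero_le i)]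
    | succ hi' =>
      have ha : q a = true := h1 0 (by simp) (by omega)
      rw [List.filter_cons, if_pos (by simp [ha]), List.take_succ_cons]
      rw [ih hi' (fun j hj hjl => h1 (j + 1) (by simpa using Nat.succ_lt_succ hj) (by omega))
        (fun j hj hjl => h2 (j + 1) (by simpa using Nat.succ_lt_succ hj) (by omega))]

-- the slice [lo:hi] is the p-and-q filter when p flips at lo and q flips at hi
theorem pvDropTake_eq_filter {α : Type} (p q : α → Bool) (l : List α) (lo hi : Nat)
    (hp1 : ∀ j (_ : j < l.length), j < lo → p l[j] = false)
    (hp2 : ∀ j (_ : j < l.length), lo ≤ j → p l[j] = true)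
    (hq1 : ∀ j (_ : j < l.length), j < hi → q l[j] = true)
    (hq2 : ∀ j (_ : j < l.length), hi ≤ j → q l[j] = false) :
    (l.drop lo).take (hi - lo) = l.filter (fun a => p a && q a) := by
  rcases Nat.lt_or_ge hi lo with hb | hb
  case inr =>
    rw [← List.filter_filter, pvFilter_eq_take q l hi hq1 hq2]
    rw [pvFilter_eq_drop p (l.take hi) lo]
    · rw [List.drop_take]
    · intro j hj hjl
      rw [List.getElem_take]
      have hjle : j < l.length := by
        have := hj; rw [List.length_take] at this; omega
      exact hp1 j hjle hjl
    · intro j hj hjl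
      rw [List.getElem_take]
      have hjle : j < l.length := by
        have := hj; rw [List.length_take] at this; omega
      exact hp2 j hjle hjl
  case inl =>
    have h0 : hi - lo = 0 := by omega
    rw [h0, List.take_zero]
    symm
    apply List.filter_eq_nil_iff.mpr
    intro x hx
    rcases List.mem_iff_getElem.mp hx with ⟨i, hi', rfl⟩
    rcases Nat.lt_or_ge i hi with h | h
    · simp [hp1 i hi' (by omega)]
    · simp [hq2 i hi' h]

-- B's sorted slice, mapped to deltas, is exactly A's inner filtered pass over t2
theorem pvInner_eq (t2 : List Int) (x win : Int) :
    (PySem.List.sorted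
        (PySem.List.slice (PySem.List.sorted (PySem.List.enumerate t2) (fun p => p.2))
          (some ((pvBisectL ((PySem.List.sorted (PySem.List.enumerate t2) (fun p => p.2)).map (fun p => p.2)) (x - win) 0
              ((PySem.List.sorted (PySem.List.enumerate t2) (fun p => p.2)).map (fun p => p.2)).length : Nat) : Int))
          (some ((pvBisectR ((PySem.List.sorted (PySem.List.enumerate t2) (fun p => p.2)).map (fun p => p.2)) (x + win) 0
              ((PySem.List.sorted (PySem.List.enumerate t2) (fun p => p.2)).map (fun p => p.2)).length : Nat) : Int)))
        (fun p => p.1)).map (fun q => q.2 - x)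
      = (t2.filter (fun y => decide (|x - y| ≤ win))).map (fun y => -x + y) := by
  set pairs := PySem.List.sorted (PySem.List.enumerate t2) (fun p => p.2) with hpairs
  set vals := pairs.map (fun p => p.2) with hvals
  set kl := pvBisectL vals (x - win) 0 vals.length with hkl
  set kr := pvBisectR vals (x + win) 0 vals.length with hkr
  have hs : List.Pairwise (· ≤ ·) vals := by
    rw [hvals, List.pairwise_map]
    exact PySem.List.sorted_pairwise (PySem.List.enumerate t2) (fun p => p.2)
  have hL := pvBisectL_spec vals (x - win) hs 0 vals.length (Nat.zero_le _) (le_refl _)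
    (fun j _ h => by omega) (fun j hj h => by omega)
  have hR := pvBisectR_spec vals (x + win) hs 0 vals.length (Nat.zero_le _) (le_refl _)
    (fun j _ h => by omega) (fun j hj h => by omega)
  have hlen : pairs.length = vals.length := by rw [hvals, List.length_map]
  have hv : ∀ j (h : j < pairs.length), vals[j]'(by omega) = (pairs[j]).2 := by
    intro j h; simp [hvals]
  -- turn the slice into the window filter of pairs
  have hslice : PySem.List.slice pairs (some (kl : Int)) (some (kr : Int))
      = pairs.filter (fun a => decide (x - win ≤ a.2) && decide (a.2 ≤ x + win)) := by
    rw [PySem.List.slice_natCast]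
    apply pvDropTake_eq_filter
    · intro j hj hjl
      have := hL.1 j (by omega) hjl
      rw [hv j hj] at this
      simp; omega
    · intro j hj hjl
      have := hL.2.1 j (by omega) hjl
      rw [hv j hj] at this
      simp; omega
    · intro j hj hjl
      have := hR.1 j (by omega) hjl
      rw [hv j hj] at this
      simp; omega
    · intro j hj hjl
      have := hR.2.1 j (by omega) hjl
      rw [hv j hj] at this
      simp; omega
  rw [hslice]
  -- name the sorted result: the same filter of enumerate t2 (strictly index-increasing)
  have hperm : ((PySem.List.enumerate t2).filter
        (fun a => decide (x - win ≤ a.2) && decide (a.2 ≤ x + win))).Perm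
      (pairs.filter (fun a => decide (x - win ≤ a.2) && decide (a.2 ≤ x + win))) :=
    (List.Perm.filter _ (PySem.List.sorted_perm (PySem.List.enumerate t2) (fun p => p.2) false)).symm
  have hpw : ((PySem.List.enumerate t2).filter
        (fun a => decide (x - win ≤ a.2) && decide (a.2 ≤ x + win))).Pairwise
      (fun a b => a.1 < b.1) :=
    List.Pairwise.filter _ (PySem.List.pairwise_lt_enumerate t2 0)
  rw [PySem.List.sorted_eq_of_perm_of_pairwise_lt _ _ (fun p => p.1) hperm hpw]
  -- push the filter through snd and rewrite to a filter of t2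
  have hsnd := PySem.List.map_snd_enumerate t2 0
  have key : (t2.filter (fun y => decide (x - win ≤ y) && decide (y ≤ x + win))).map (fun y => y - x)
      = ((PySem.List.enumerate t2).filter
          (fun a => decide (x - win ≤ a.2) && decide (a.2 ≤ x + win))).map (fun q => q.2 - x) := by
    conv_lhs => rw [← hsnd]
    rw [List.filter_map, List.map_map]
    rfl
  rw [← key]
  rw [List.filter_congr (q := fun y => decide (|x - y| ≤ win))
    (fun y _ => by simp only [← Bool.decide_and, decide_eq_decide]; rw [abs_le]; omega)]
  apply List.map_congr_left
  intro y _
  omega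

-- ===== VERDICT (by name: the statement is the Claim_ definition above) =====
theorem possible_time_del_spec : Claim_equal_possible_time_del := by
  intro t1 t2 win T _
  unfold Spec_possible_time_del possible_time_del possible_time_del_alt
  apply List.foldl_ext
  intro acc x _
  by_cases hw : win ≤ x ∧ x ≤ T - win
  · rw [if_pos hw, if_pos hw]
    rw [PySem.List.foldl_append_ite (fun y => |x - y| ≤ win) (fun y => -x + y) t2 acc]
    rw [PySem.List.foldl_append_singleton_eq_map]
    rw [pvInner_eq t2 x win]
  · rw [if_neg hw, if_neg hw]
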